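-- pv_equiv track=rewrite | github.com/nadege/advent-of-code | src/year_2021/day_1/day_1.py | compute_increase_number_by_trio
-- ===== SOURCE A (Python) =====
-- from typing import List
--
-- def compute_increase_number_by_trio(lines: List[int]):
--     count = 0
--     for i, _ in enumerate(lines):
--         if i == 0:
--             continue
--         if len(lines) - i < 3:
--             break
--
--         if sum(lines[i:i+3]) > sum(lines[i-1:i-1+3]):
--             count += 1
--
--     return count
-- ===== SOURCE B (Python) =====
-- from typing import List
--
-- def compute_increase_number_by_trio(lines: List[int]):
--     # telescoping: consecutive 3-window sums differ exactly by lines[j+3] - lines[j]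
--     return sum(1 for a, b in zip(lines, lines[3:]) if b > a)
-- ===== Notes on version B (the rewrite author's own statement) =====
-- stated objective: idiomatic
-- what changed: Replaces the indexed loop that re-sums two 3-element slices per step with the telescoping identity: one pass over zip(lines, lines[3:]) counting pairs where the later element is larger.
import Mathlib
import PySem

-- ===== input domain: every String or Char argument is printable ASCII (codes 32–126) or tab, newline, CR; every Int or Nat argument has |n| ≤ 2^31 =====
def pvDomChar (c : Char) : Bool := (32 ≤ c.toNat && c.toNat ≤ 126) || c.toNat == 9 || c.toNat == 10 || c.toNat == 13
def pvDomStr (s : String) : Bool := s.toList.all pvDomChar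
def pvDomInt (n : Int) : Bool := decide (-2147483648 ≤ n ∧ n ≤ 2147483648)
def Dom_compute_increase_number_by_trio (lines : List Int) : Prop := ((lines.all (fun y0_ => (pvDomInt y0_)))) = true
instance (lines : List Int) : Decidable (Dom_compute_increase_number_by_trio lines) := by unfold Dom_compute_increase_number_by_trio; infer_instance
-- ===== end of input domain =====

-- B replaces A's per-step re-summing of two 3-element slices by one zip pass
-- using the telescoping identity (count pairs with lines[j+3] > lines[j]).

-- ===== PORT A =====
-- the 'for i, _ in enumerate(lines)' loop of A: 'continue' at i = 0,
-- 'break' when len(lines) - i < 3, else compare the two 3-slice sums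
def aLoop (lines : List Int) (n : Nat) (i : Nat) (count : Int) : Int :=
  if _h : i < n then
    if i = 0 then aLoop lines n (i + 1) count
    else if (n : Int) - (i : Int) < 3 then count
    else
      aLoop lines n (i + 1)
        (if (PySem.List.slice lines (some (i : Int)) (some ((i : Int) + 3))).sum >
            (PySem.List.slice lines (some ((i : Int) - 1)) (some ((i : Int) - 1 + 3))).sum
         then count + 1 else count)
  else count
termination_by n - i

def compute_increase_number_by_trio (lines : List Int) : Int :=
  aLoop lines lines.length 0 0

-- ===== PORT B =====
def compute_increase_number_by_trio_alt (lines : List Int) : Int :=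
  (lines.zip (PySem.List.slice lines (some 3) none)).foldl
    (fun acc ab => if ab.2 > ab.1 then acc + 1 else acc) 0

-- ===== PRECONDITION & SPEC =====
def Spec_compute_increase_number_by_trio (lines : List Int) (out : Int) : Prop := out = compute_increase_number_by_trio_alt lines
instance (lines : List Int) (out : Int) : Decidable (Spec_compute_increase_number_by_trio lines out) := by unfold Spec_compute_increase_number_by_trio; infer_instance

-- ===== CLAIM (what is proved, stated in full; the proofs are below) =====
def Claim_equal_compute_increase_number_by_trio : Prop := ∀ (lines : List Int), Dom_compute_increase_number_by_trio lines → Spec_compute_increase_number_by_trio lines (compute_increase_number_by_trio lines)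

-- ===== LEMMAS AND PROOFS =====

-- A's loop-body test at index i
def condA (l : List Int) (i : Nat) : Bool :=
  (PySem.List.slice l (some (i : Int)) (some ((i : Int) + 3))).sum >
  (PySem.List.slice l (some ((i : Int) - 1)) (some ((i : Int) - 1 + 3))).sum

theorem aLoop_stop (l : List Int) (n i : Nat) (c : Int)
    (h1 : 1 ≤ i) (h2 : (n : Int) - (i : Int) < 3) : aLoop l n i c = c := by
  rw [aLoop]
  by_cases h : i < n
  · rw [dif_pos h, if_neg (by omega), if_pos h2]
  · rw [dif_neg h]

theorem aLoop_count (l : List Int) (n : Nat) :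
    ∀ (k i : Nat) (c : Int), 1 ≤ i → i + k + 2 = n →
      aLoop l n i c = c + ((List.range' i k).countP (condA l) : Int) := by
  intro k
  induction k with
  | zero =>
    intro i c h1 h2
    simp [aLoop_stop l n i c h1 (by omega)]
  | succ k ih =>
    intro i c h1 h2
    rw [aLoop, dif_pos (by omega), if_neg (by omega), if_neg (by omega),
      ih (i + 1) _ (by omega) (by omega), List.range'_succ, List.countP_cons]
    unfold condA
    split <;> rename_i hc
    · rw [if_pos (by simpa [decide_eq_true_eq] using hc)]
      push_cast; ring
    · rw [if_neg (by simpa [decide_eq_true_eq] using hc)]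
      push_cast; ring

-- three-element slice of l at j, for j + 3 ≤ l.length
theorem slice_three (l : List Int) (j : Nat) (h : j + 3 ≤ l.length) :
    PySem.List.slice l (some (j : Int)) (some ((j : Int) + 3)) =
      [l[j]'(by omega), l[j+1]'(by omega), l[j+2]'(by omega)] := by
  have e : ((j : Int) + 3) = ((j + 3 : Nat) : Int) := by push_cast; ring
  rw [e, PySem.List.slice_natCast]
  apply List.ext_getElem
  · simp; omega
  · intro m hm hm'
    simp only [List.getElem_take, List.getElem_drop]
    have hm3 : m < 3 := by simp at hm'; omega
    interval_cases m <;> simp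

theorem condA_iff (l : List Int) (j : Nat) (h1 : 1 ≤ j) (h2 : j + 3 ≤ l.length) :
    condA l j = true ↔ l[j+2]'(by omega) > l[j-1]'(by omega) := by
  unfold condA
  obtain ⟨j', rfl⟩ : ∃ j', j = j' + 1 := ⟨j - 1, by omega⟩
  have e2 : ((j' + 1 : Nat) : Int) - 1 = ((j' : Nat) : Int) := by push_cast; ring
  rw [slice_three l (j' + 1) (by omega), e2, slice_three l j' (by omega)]
  simp only [List.sum_cons, List.sum_nil, decide_eq_true_eq,
    Nat.add_sub_cancel, show j' + 1 + 1 = j' + 2 from by omega,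
    show j' + 1 + 2 = j' + 3 from by omega]
  omega

-- B as a count over indices
theorem alt_count (l : List Int) :
    compute_increase_number_by_trio_alt l =
      ((List.range (l.length - 3)).countP
        (fun j => decide (l.getD (j + 3) 0 > l.getD j 0)) : Int) := by
  unfold compute_increase_number_by_trio_alt
  rw [show (3 : Int) = ((3 : Nat) : Int) from rfl, PySem.List.slice_from_natCast]
  have hz : l.zip (l.drop 3) =
      (List.range (l.length - 3)).map (fun j => (l.getD j 0, l.getD (j + 3) 0)) := by
    apply List.ext_getElem
    · simp
    · intro m hm hm'
      have hm1 : m < l.length - 3 := by simp at hm; omega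
      simp only [List.getElem_zip, List.getElem_map, List.getElem_range, List.getElem_drop]
      rw [List.getD_eq_getElem l 0 (by omega), List.getD_eq_getElem l 0 (by omega)]
      simp [Nat.add_comm 3 m]
  rw [hz, PySem.List.foldl_ite_add_one, List.countP_map]
  simp [Function.comp_def]

-- ===== VERDICT (by name: the statement is the Claim_ definition above) =====
theorem compute_increase_number_by_trio_spec : Claim_equal_compute_increase_number_by_trio := by
  intro l _
  unfold Spec_compute_increase_number_by_trio
  rw [alt_count]
  unfold compute_increase_number_by_trio
  rw [aLoop]
  by_cases h0 : 0 < l.length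
  · rw [dif_pos h0, if_pos rfl]
    by_cases h3 : 3 ≤ l.length
    · rw [aLoop_count l l.length (l.length - 3) 1 0 (by omega) (by omega)]
      rw [List.range'_eq_map_range, List.countP_map]
      have hcc : ∀ j ∈ List.range (l.length - 3),
          (condA l ∘ (fun i => 1 + i)) j = true ↔
            (fun j => decide (l.getD (j + 3) 0 > l.getD j 0)) j = true := by
        intro j hj
        have hj' : j < l.length - 3 := List.mem_range.mp hj
        have g1 : l.getD (j + 3) 0 = l[j + 3]'(by omega) :=
          List.getD_eq_getElem l 0 (by omega)
        have g2 : l.getD j 0 = l[j]'(by omega) :=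
          List.getD_eq_getElem l 0 (by omega)
        simp only [Function.comp_def]
        rw [condA_iff l (1 + j) (by omega) (by omega),
          decide_eq_true_eq, g1, g2]
        simp only [show 1 + j + 2 = j + 3 from by omega,
          show 1 + j - 1 = j from by omega]
      rw [List.countP_congr hcc]
      simp
    · rw [aLoop_stop l l.length 1 0 (by omega) (by omega)]
      rw [show l.length - 3 = 0 from by omega]
      simp
  · rw [dif_neg h0]
    rw [show l.length - 3 = 0 from by omega]
    simp
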